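-- pv_equiv track=rewrite | github.com/yeon-hong/coding-test | 프로그래머스/1/72410. 신규 아이디 추천/신규 아이디 추천.py | solution
-- ===== SOURCE A (Python) =====
-- def solution(new_id):
--     answer = []
--
--     # 1단계: 소문자 변환
--     new_id = new_id.lower()
--
--     # 2단계: 허용 문자만 추가
--     for char in new_id:
--         if char.isalnum() or char in ['-', '_', '.']:
--             answer.append(char)
--
--     # 3단계: 연속된 마침표 제거
--     filtered = []
--     prev = ''
--     for ch in answer:
--         if not (ch == '.' and prev == '.'):
--             filtered.append(ch)
--         prev = ch
--     answer = filtered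
--
--     # 4단계: 처음이나 끝의 '.' 제거
--     if answer and answer[0] == '.':
--         answer.pop(0)
--     if answer and answer[-1] == '.':
--         answer.pop()
--
--     # 5단계: 빈 문자열이면 'a' 추가
--     if not answer:
--         answer.append('a')
--
--     # 6단계: 길이가 16자 이상이면 자르고 마지막이 '.'이면 제거
--     answer = answer[:15]
--     if answer[-1] == '.':
--         answer.pop()
--
--     # 7단계: 길이가 2자 이하라면 마지막 문자를 반복해서 길이 3까지 확장
--     while len(answer) < 3:
--         answer.append(answer[-1])
--
--     return ''.join(answer)
-- ===== SOURCE B (Python) =====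
-- def solution(new_id):
--     s = ''.join(c for c in new_id.lower() if c.isalnum() or c in '-_.')
--     s = '.'.join(p for p in s.split('.') if p) or 'a'
--     s = s[:15].rstrip('.')
--     return s + s[-1] * (3 - len(s))
-- ===== Notes on version B (the rewrite author's own statement) =====
-- stated objective: idiomatic
-- what changed: A's stateful prev-tracking dot-collapse loop and the pop-based edge trimming are replaced by one split/drop-empty-chunks/join step on the dot separator, the conditional single pop after slicing by a right-strip of the separator, and the while-append pad loop by a single replication.
import Mathlib
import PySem

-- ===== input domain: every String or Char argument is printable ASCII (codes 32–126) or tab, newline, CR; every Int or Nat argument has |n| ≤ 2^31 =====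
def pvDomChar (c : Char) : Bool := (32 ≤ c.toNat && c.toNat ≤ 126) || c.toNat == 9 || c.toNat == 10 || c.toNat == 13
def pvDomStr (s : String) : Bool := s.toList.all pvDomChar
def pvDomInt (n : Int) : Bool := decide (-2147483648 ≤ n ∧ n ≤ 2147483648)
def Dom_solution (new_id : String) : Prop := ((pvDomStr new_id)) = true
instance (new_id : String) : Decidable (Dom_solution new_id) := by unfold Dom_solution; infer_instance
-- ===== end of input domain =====

-- B replaces A's stateful prev-tracking dot-collapse loop and the pop-based edge trimming by
-- split('.')/drop-empties/join('.') plus slice+rstrip('.'), a differently shaped pass (objective: simpler).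

-- ===== PORT A =====
-- step 7: 'while len(answer) < 3: answer.append(answer[-1])' (hand-ported loop; the empty case never occurs)
def pvPad3 (xs : List Char) : List Char :=
  if xs.length < 3 then
    match h : xs.getLast? with
    | some c => pvPad3 (xs ++ [c])
    | none => xs
  else xs
termination_by 3 - xs.length
decreasing_by simp_all; omega

def solution (new_id : String) : String :=
  -- 1단계
  let lowered := PySem.Chars.lower new_id.toList
  -- 2단계
  let answer := lowered.foldl
    (fun acc ch => if PySem.Chars.isalnum ch || ['-', '_', '.'].contains ch then acc ++ [ch] else acc) []
  -- 3단계 (prev carried as a string = List Char, '' initially, as in the Python)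
  let answer := (answer.foldl
    (fun st ch => (if ch = '.' ∧ st.2 = ['.'] then st.1 else st.1 ++ [ch], [ch]))
    (([] : List Char), ([] : List Char))).1
  -- 4단계 ('if answer and answer[0]=='.'' / 'if answer and answer[-1]=='.'')
  let answer := if answer.head? = some '.' then answer.tail else answer
  let answer := if answer.getLast? = some '.' then answer.dropLast else answer
  -- 5단계
  let answer := if answer = [] then ['a'] else answer
  -- 6단계 (answer[-1]: the list is provably nonempty here, so the default is never read)
  let answer := PySem.List.slice answer none (some 15)
  let answer := if PySem.List.pyGetD answer (-1) 'a' = '.' then answer.dropLast else answer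
  -- 7단계 + ''.join
  String.ofList (pvPad3 answer)

-- ===== PORT B =====
def solution_alt (new_id : String) : String :=
  let s := (PySem.Chars.lower new_id.toList).filter
    (fun c => PySem.Chars.isalnum c || ['-', '_', '.'].contains c)
  -- '.'.join(p for p in s.split('.') if p) or 'a'
  let t := PySem.Chars.join ['.'] ((PySem.Chars.splitOn s ['.']).filter (· ≠ []))
  let t := if t = [] then ['a'] else t
  -- s = s[:15].rstrip('.')  (rstrip('.') hand-ported: drop all trailing '.')
  let t := PySem.List.slice t none (some 15)
  let t := (t.reverse.dropWhile (· == '.')).reverse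
  -- s + s[-1] * (3 - len(s))  (t is provably nonempty here, so the default is never read)
  String.ofList (t ++ List.replicate (3 - t.length) (t.getLastD 'a'))

-- ===== PRECONDITION & SPEC =====
def Spec_solution (new_id : String) (out : String) : Prop := out = solution_alt new_id
instance (new_id : String) (out : String) : Decidable (Spec_solution new_id out) := by unfold Spec_solution; infer_instance

-- ===== CLAIM (what is proved, stated in full; the proofs are below) =====
def Claim_equal_solution : Prop := ∀ (new_id : String), Dom_solution new_id → Spec_solution new_id (solution new_id)

-- ===== LEMMAS AND PROOFS =====

-- A's step-3 loop as a structural recursion (the Bool is 'prev was a dot')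
def pvCol (l : List Char) (b : Bool) : List Char :=
  match l with
  | [] => []
  | c :: t => (if c = '.' ∧ b then [] else [c]) ++ pvCol t (c = '.')

-- Python's s.split('.') as a plain structural recursion (pre = current chunk)
def pvSplitD (pre : List Char) (l : List Char) : List (List Char) :=
  match l with
  | [] => [pre]
  | c :: t => if c = '.' then pre :: pvSplitD [] t else pvSplitD (pre ++ [c]) t


-- B's dot-join of the nonempty chunks, on a plain char list
def pvG (l : List Char) : List Char :=
  PySem.Chars.join ['.'] ((pvSplitD [] l).filter (· ≠ []))

-- 'no two adjacent dots'
def pvNoDD (l : List Char) : Prop := l.IsChain (fun a b => ¬(a = '.' ∧ b = '.'))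

-- ---- bridging A's foldl loops to structural recursions ----
lemma pvCol_foldl (l : List Char) (acc p : List Char) :
    (l.foldl (fun st ch => (if ch = '.' ∧ st.2 = ['.'] then st.1 else st.1 ++ [ch], [ch])) (acc, p)).1
      = acc ++ pvCol l (p = ['.']) := by
  induction l generalizing acc p with
  | nil => simp [pvCol]
  | cons c t ih =>
    simp only [List.foldl_cons, pvCol]
    by_cases h : c = '.' ∧ p = ['.']
    · obtain ⟨h1, h2⟩ := h
      simp [h1, h2, ih]
    · rw [if_neg h, ih]
      by_cases hc : c = '.'
      · have hp : ¬ p = ['.'] := fun hp => h ⟨hc, hp⟩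
        simp [hc, hp]
      · simp [hc]

-- ---- PySem.Chars.splitOn s ['.'] = pvSplitD [] s ----
lemma pvSplitOn_go (l cur acc : List Char) (accs : List (List Char)) (fuel : Nat)
    (hf : l.length ≤ fuel) :
    PySem.Chars.splitOn.go ['.'] fuel l cur accs = accs.reverse ++ pvSplitD cur.reverse l := by
  induction l generalizing cur accs fuel with
  | nil =>
    rw [PySem.Chars.splitOn.go.eq_def]
    cases fuel <;> simp [pvSplitD]
  | cons c t ih =>
    cases fuel with
    | zero => simp at hf
    | succ n =>
      rw [PySem.Chars.splitOn.go.eq_def]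
      have hpref : (['.'] : List Char).isPrefixOf (c :: t) = (c == '.') := by
        simp [List.isPrefixOf, eq_comm]
      simp only [hpref]
      simp only [List.length_cons] at hf
      by_cases hc : c = '.'
      · subst hc
        rw [if_pos (by simp)]
        simp only [List.length_cons, List.length_nil, List.drop_succ_cons, List.drop_zero]
        rw [ih _ _ _ (by omega)]
        simp [pvSplitD]
      · rw [if_neg (by simp [hc])]
        rw [ih _ _ _ (by omega)]
        simp [pvSplitD, hc]

lemma pvSplitOn_eq (s : List Char) : PySem.Chars.splitOn s ['.'] = pvSplitD [] s := by
  rw [PySem.Chars.splitOn]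
  simpa using pvSplitOn_go s [] [] [] (s.length + 1) (by omega)

-- ---- structural facts about pvSplitD / pvG ----
lemma pvSplitD_word (pre w l : List Char) (hw : ∀ c ∈ w, c ≠ '.') :
    pvSplitD pre (w ++ l) = pvSplitD (pre ++ w) l := by
  induction w generalizing pre with
  | nil => simp
  | cons c t ih =>
    have hc : c ≠ '.' := hw c (by simp)
    simp only [List.cons_append, pvSplitD, if_neg hc]
    rw [ih _ (fun x hx => hw x (by simp [hx]))]
    simp



lemma pvSplitD_head_nonempty (pre l : List Char) :
    ∃ u rest, pvSplitD pre l = (pre ++ u) :: rest := by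
  induction l generalizing pre with
  | nil => exact ⟨[], [], by simp [pvSplitD]⟩
  | cons c t ih =>
    by_cases hc : c = '.'
    · exact ⟨[], pvSplitD [] t, by simp [pvSplitD, hc]⟩
    · obtain ⟨u, rest, hu⟩ := ih (pre ++ [c])
      exact ⟨[c] ++ u, rest, by simp [pvSplitD, hc, hu]⟩

-- chunks of pvSplitD are dot-free
lemma pvSplitD_dotfree (pre l : List Char) (hpre : ∀ c ∈ pre, c ≠ '.') :
    ∀ p ∈ pvSplitD pre l, ∀ c ∈ p, c ≠ '.' := by
  induction l generalizing pre with
  | nil => simpa [pvSplitD] using hpre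
  | cons c t ih =>
    by_cases hc : c = '.'
    · subst hc
      intro p hp
      rw [pvSplitD, if_pos rfl] at hp
      rcases List.mem_cons.mp hp with h | h
      · subst h; exact hpre
      · exact ih [] (by simp) p h
    · simp only [pvSplitD, if_neg hc]
      apply ih (pre ++ [c])
      intro x hx
      rcases List.mem_append.mp hx with h | h
      · exact hpre x h
      · simp only [List.mem_singleton] at h; subst h; exact hc

-- ---- pvCol facts ----
lemma pvCol_cons_eq (c : Char) (t : List Char) (b : Bool) :
    pvCol (c :: t) b = (if c = '.' ∧ b then [] else [c]) ++ pvCol t (c = '.') := rfl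

lemma pvCol_word (w l : List Char) (hword : ∀ c ∈ w, c ≠ '.') (b : Bool) (hb : w ≠ [] ∨ b = false) :
    pvCol (w ++ l) b = w ++ pvCol l false := by
  induction w generalizing b with
  | nil =>
    rcases hb with h | h
    · simp at h
    · subst h; simp
  | cons c t ih =>
    have hc : c ≠ '.' := hword c (by simp)
    rw [List.cons_append, pvCol_cons_eq, if_neg (by simp [hc])]
    have hdec : (decide (c = '.')) = false := by simp [hc]
    rw [hdec, ih (fun x hx => hword x (by simp [hx])) false (Or.inr rfl)]
    simp

lemma pvCol_dots_true (l : List Char) :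
    pvCol (l.dropWhile (· = '.')) true = pvCol l true := by
  induction l with
  | nil => rfl
  | cons c t ih =>
    by_cases hc : c = '.'
    · rw [List.dropWhile_cons_of_pos (by simp [hc])]
      rw [ih]; simp [pvCol, hc]
    · rw [List.dropWhile_cons_of_neg (by simp [hc])]

lemma pvCol_state_irrel (l : List Char) (hl : l.head? ≠ some '.') (b : Bool) :
    pvCol l b = pvCol l false := by
  cases l with
  | nil => rfl
  | cons c t => simp only [List.head?_cons, ne_eq, Option.some.injEq] at hl; simp [pvCol, hl]

-- head of pvCol _ false is head of input
lemma pvCol_cons (c : Char) (t : List Char) :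
    pvCol (c :: t) false = c :: pvCol t (c = '.') := by
  simp [pvCol]

lemma pvFilter_dropDots (l : List Char) :
    (pvSplitD [] l).filter (· ≠ []) = (pvSplitD [] (l.dropWhile (· = '.'))).filter (· ≠ []) := by
  induction l with
  | nil => rfl
  | cons c t ih =>
    by_cases hc : c = '.'
    · subst hc
      rw [pvSplitD, if_pos rfl, List.filter_cons_of_neg (by simp),
        List.dropWhile_cons_of_pos (by simp)]
      exact ih
    · rw [List.dropWhile_cons_of_neg (by simp [hc])]

lemma pvG_dropDots (l : List Char) : pvG l = pvG (l.dropWhile (· = '.')) := by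
  unfold pvG; rw [pvFilter_dropDots]

lemma pvJoin_cons_ne (a : List Char) (L : List (List Char)) (h : L ≠ []) :
    PySem.Chars.join ['.'] (a :: L) = a ++ '.' :: PySem.Chars.join ['.'] L := by
  cases L with
  | nil => simp at h
  | cons q rest => rw [PySem.Chars.join_cons_cons]; simp

-- ---- the core: collapse + trim-edges = join of nonempty chunks ----
def pvTrimR (xs : List Char) : List Char :=
  if xs.getLast? = some '.' then xs.dropLast else xs

lemma pvTrimR_append (xs ys : List Char) (hy : ys ≠ []) :
    pvTrimR (xs ++ ys) = xs ++ pvTrimR ys := by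
  unfold pvTrimR
  rw [List.getLast?_append_of_ne_nil _ hy]
  split_ifs with h
  · rw [List.dropLast_append_of_ne_nil hy]
  · rfl

lemma pvMain (n : Nat) : ∀ l : List Char, l.length ≤ n → l.head? ≠ some '.' →
    pvTrimR (pvCol l false) = pvG l := by
  induction n with
  | zero =>
    intro l hl _
    have : l = [] := List.eq_nil_of_length_eq_zero (by omega)
    subst this; rfl
  | succ n ih =>
    intro l hl hhead
    cases hw : l.takeWhile (fun c => c ≠ '.') with
    | nil =>
      -- l is empty (head is not a dot, so takeWhile nil forces l = [])
      cases l with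
      | nil => rfl
      | cons c t =>
        simp only [List.head?_cons, ne_eq, Option.some.injEq] at hhead
        rw [List.takeWhile_cons_of_pos (by simp [hhead])] at hw
        simp at hw
    | cons c wt =>
      have hsplit : l = (c :: wt) ++ l.dropWhile (fun c => c ≠ '.') := by
        conv_lhs => rw [← List.takeWhile_append_dropWhile (p := fun c => c ≠ '.') (l := l)]
        rw [hw]
      have hword : ∀ x ∈ (c :: wt), x ≠ '.' := by
        intro x hx
        have := List.mem_takeWhile_imp (hw ▸ hx)
        simpa using this
      set r := l.dropWhile (fun c => c ≠ '.') with hr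
      rw [hsplit, pvCol_word _ _ hword _ (Or.inl (by simp)), pvG]
      rw [pvSplitD_word _ _ _ hword]
      cases hrc : r with
      | nil =>
        rw [show pvCol [] false = [] from rfl, List.append_nil, List.nil_append, pvSplitD]
        rw [List.filter_cons_of_pos (by simp), List.filter_nil, PySem.Chars.join_singleton]
        have hne : (c :: wt) ≠ [] := by simp
        have hlast : (c :: wt).getLast? = some ((c :: wt).getLast hne) :=
          List.getLast?_eq_getLast hne
        unfold pvTrimR
        rw [if_neg (by rw [hlast]; simpa using hword _ (List.getLast_mem hne))]
      | cons d rt =>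
        have hd : d = '.' := by
          have := List.head?_dropWhile_not (p := fun c => c ≠ '.') l
          rw [← hr, hrc] at this
          simpa using this
        subst hd
        rw [pvCol_cons]
        simp only [if_pos rfl, decide_true]
        -- drop the dots after the first one
        set r2 := rt.dropWhile (· = '.') with hr2
        have hlen2 : r2.length ≤ n := by
          have h1 : r2.length ≤ rt.length := List.length_dropWhile_le _ _
          have h2 : l.length = (c :: wt).length + (rt.length + 1) := by
            rw [hsplit, hrc]; simp; try omega
          simp at h2; omega
        have hr2head : r2.head? ≠ some '.' := by
          have h0 := List.head?_dropWhile_not (p := fun c : Char => c = '.') rt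
          rw [← hr2] at h0
          intro h
          rw [h] at h0
          simp at h0
        have hcol : pvCol rt true = pvCol r2 false := by
          rw [← pvCol_dots_true, ← hr2, pvCol_state_irrel _ hr2head]
        rw [hcol]
        have hGrt : (pvSplitD [] rt).filter (· ≠ []) = (pvSplitD [] r2).filter (· ≠ []) := by
          rw [hr2]; exact pvFilter_dropDots rt
        have hIH : pvTrimR (pvCol r2 false) = pvG r2 := ih r2 hlen2 hr2head
        have hsd : pvSplitD ([] ++ (c :: wt)) ('.' :: rt) = (c :: wt) :: pvSplitD [] rt := by
          rw [List.nil_append, pvSplitD, if_pos rfl]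
        rw [hsd, List.filter_cons_of_pos (by simp), hGrt]
        rw [show (c :: wt) ++ '.' :: pvCol r2 false
              = (c :: wt) ++ ('.' :: pvCol r2 false) from rfl]
        rw [pvTrimR_append _ _ (by simp)]
        by_cases hx : r2 = []
        · rw [hx]
          simp [pvTrimR, pvSplitD, pvCol, PySem.Chars.join_singleton]
        · obtain ⟨x, xt, hx'⟩ := List.exists_cons_of_ne_nil hx
          have hxne : x ≠ '.' := by
            intro hcon
            apply hr2head
            rw [hx', hcon]
            rfl
          have hys : pvCol r2 false ≠ [] := by
            rw [hx', pvCol_cons_eq, if_neg (by simp [hxne])]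
            simp
          have hfil_ne : (pvSplitD [] r2).filter (· ≠ []) ≠ [] := by
            rw [hx', pvSplitD, if_neg hxne]
            obtain ⟨u, rest, hu⟩ := pvSplitD_head_nonempty ([] ++ [x]) xt
            rw [hu, List.filter_cons_of_pos (by simp)]
            simp
          rw [show ('.' :: pvCol r2 false) = ['.'] ++ pvCol r2 false from rfl,
            pvTrimR_append _ _ hys, hIH, pvJoin_cons_ne _ _ hfil_ne]
          simp [pvG]

-- ---- properties of pvG: no leading dot, no trailing dot, no adjacent dots ----
lemma pvNoDD_of_dotfree (p : List Char) (h : ∀ c ∈ p, c ≠ '.') : pvNoDD p := by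
  unfold pvNoDD
  apply List.Pairwise.isChain
  apply List.pairwise_of_forall_mem_list
  intro a ha b _ hab
  exact h a ha hab.1

def pvGood (xs : List Char) : Prop :=
  xs.head? ≠ some '.' ∧ xs.getLast? ≠ some '.' ∧ pvNoDD xs

lemma pvJoin_good (L : List (List Char)) (hL : ∀ p ∈ L, p ≠ [] ∧ ∀ c ∈ p, c ≠ '.') :
    pvGood (PySem.Chars.join ['.'] L) := by
  induction L with
  | nil =>
    refine ⟨by simp [PySem.Chars.join_nil], by simp [PySem.Chars.join_nil], ?_⟩
    simp [pvNoDD, PySem.Chars.join_nil]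
  | cons p rest ih =>
    obtain ⟨hp, hpd⟩ := hL p (by simp)
    cases rest with
    | nil =>
      rw [PySem.Chars.join_singleton]
      refine ⟨?_, ?_, pvNoDD_of_dotfree p hpd⟩
      · intro h
        cases p with
        | nil => simp at h
        | cons a t =>
          simp only [List.head?_cons, Option.some.injEq] at h
          exact hpd a (by simp) h
      · intro h
        have hmem : '.' ∈ p := by
          rcases List.getLast?_eq_some_iff.mp h with ⟨ys, hy⟩
          rw [hy]; simp
        exact hpd '.' hmem rfl
    | cons q rest' =>
      have hrest := ih (fun x hx => hL x (by simp [List.mem_cons] at hx ⊢; tauto))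
      rw [pvJoin_cons_ne _ _ (by simp)]
      obtain ⟨h1, h2, h3⟩ := hrest
      refine ⟨?_, ?_, ?_⟩
      · intro h
        cases p with
        | nil => exact hp rfl
        | cons a t =>
          simp only [List.cons_append, List.head?_cons, Option.some.injEq] at h
          exact hpd a (by simp) h
      · have hJne : PySem.Chars.join ['.'] (q :: rest') ≠ [] := by
          have hq := hL q (by simp)
          cases rest' with
          | nil => rw [PySem.Chars.join_singleton]; exact hq.1
          | cons q' r' =>
            rw [pvJoin_cons_ne _ _ (by simp)]
            cases q with
            | nil => exact absurd rfl hq.1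
            | cons a t => simp
        rw [List.getLast?_append_of_ne_nil _ (by simp),
          show ('.' :: PySem.Chars.join ['.'] (q :: rest'))
            = ['.'] ++ PySem.Chars.join ['.'] (q :: rest') from rfl,
          List.getLast?_append_of_ne_nil _ hJne]
        exact h2
      · unfold pvNoDD at h3 ⊢
        rw [List.isChain_append]
        refine ⟨pvNoDD_of_dotfree p hpd, ?_, ?_⟩
        · rw [show ('.' :: PySem.Chars.join ['.'] (q :: rest'))
                = ['.'] ++ PySem.Chars.join ['.'] (q :: rest') from rfl, List.isChain_append]
          refine ⟨List.isChain_singleton _, h3, ?_⟩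
          intro x hx y hy hcon
          rw [hcon.2] at hy
          exact h1 (Option.mem_def.mp hy)
        · intro x hx y hy hcon
          apply hpd x _ hcon.1
          rcases List.getLast?_eq_some_iff.mp hx with ⟨ys, hys⟩
          rw [hys]; simp

lemma pvGood_G (l : List Char) : pvGood (pvG l) := by
  apply pvJoin_good
  intro p hp
  have hmem := List.mem_of_mem_filter hp
  have hne : p ≠ [] := by simpa using List.of_mem_filter hp
  exact ⟨hne, pvSplitD_dotfree [] l (by simp) p hmem⟩

-- ---- A's step-4 leading trim in terms of dropWhile ----
lemma pvTrimL_col (l : List Char) :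
    (if (pvCol l false).head? = some '.' then (pvCol l false).tail else pvCol l false)
      = pvCol (l.dropWhile (· = '.')) false := by
  cases l with
  | nil => rfl
  | cons c t =>
    by_cases hc : c = '.'
    · subst hc
      rw [pvCol_cons]
      simp only [List.head?_cons, List.tail_cons, decide_true]
      rw [List.dropWhile_cons_of_pos (by simp)]
      have hh : (t.dropWhile (· = '.')).head? ≠ some '.' := by
        have h0 := List.head?_dropWhile_not (p := fun c : Char => c = '.') t
        intro h; rw [h] at h0; simp at h0
      rw [← pvCol_dots_true t, pvCol_state_irrel _ hh]
      simp
    · rw [pvCol_cons_eq, if_neg (by simp [hc])]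
      rw [if_neg (by simp), List.dropWhile_cons_of_neg (by simp [hc]), pvCol_cons_eq,
        if_neg (by simp [hc])]

-- ---- the tail stages (slice 15 / drop one-vs-all trailing dots / pad to 3) ----
lemma pvRstrip_eq_trimR (y : List Char) (hnodd : pvNoDD y) :
    (y.reverse.dropWhile (· == '.')).reverse = pvTrimR y := by
  rcases List.eq_nil_or_concat y with rfl | ⟨ys, c, rfl⟩
  · rfl
  · simp only [List.concat_eq_append] at *
    rw [List.reverse_append, List.reverse_singleton, List.singleton_append]
    by_cases hc : c = '.'
    · subst hc
      rw [List.dropWhile_cons_of_pos (by simp)]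
      have hlast : ys.getLast? ≠ some '.' := by
        intro h
        unfold pvNoDD at hnodd
        rw [List.isChain_append] at hnodd
        exact hnodd.2.2 '.' h '.' (by simp) ⟨rfl, rfl⟩
      have hdw : ys.reverse.dropWhile (· == '.') = ys.reverse := by
        cases hyrev : ys.reverse with
        | nil => rfl
        | cons a t =>
          have ha : a ≠ '.' := by
            intro hcon
            apply hlast
            rw [← List.head?_reverse, hyrev, hcon]
            rfl
          rw [List.dropWhile_cons_of_neg (by simp [ha])]
      rw [hdw, List.reverse_reverse, pvTrimR,
        if_pos (by rw [List.getLast?_concat]), List.dropLast_concat]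
    · rw [List.dropWhile_cons_of_neg (by simp [hc]), ← List.reverse_concat,
        List.reverse_reverse, pvTrimR, if_neg (by rw [List.getLast?_concat]; simp [hc])]

lemma pvPad3_eq (z : List Char) (hz : z ≠ []) :
    pvPad3 z = z ++ List.replicate (3 - z.length) (z.getLastD 'a') := by
  obtain ⟨c, hc⟩ : ∃ c, z.getLast? = some c := by
    cases hy : z.getLast? with
    | none => exact absurd (List.getLast?_eq_none_iff.mp hy) hz
    | some c => exact ⟨c, rfl⟩
  clear hz
  have h3 : ∀ n : Nat, ∀ z : List Char, z.getLast? = some c → 3 - z.length = n →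
      pvPad3 z = z ++ List.replicate n c := by
    intro n
    induction n with
    | zero =>
      intro z hlast hn
      rw [pvPad3, if_neg (by omega)]
      simp
    | succ n ihn =>
      intro z hlast hn
      rw [pvPad3, if_pos (by omega)]
      split
      next c' heq =>
        rw [hlast] at heq
        injection heq with hcc
        subst hcc
        rw [ihn (z ++ [c]) (by rw [List.getLast?_concat]) (by simp; omega)]
        simp [List.replicate_succ]
      next heq =>
        rw [hlast] at heq
        cases heq
  rw [h3 (3 - z.length) z hc rfl]
  have : z.getLastD 'a' = c := by simp [List.getLastD_eq_getLast?, hc]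
  rw [this]

-- A's conditional pop of a trailing dot is pvTrimR (on a nonempty list)
lemma pvPop_eq_trimR (y : List Char) (hy : y ≠ []) :
    (if PySem.List.pyGetD y (-1) 'a' = '.' then y.dropLast else y) = pvTrimR y := by
  rcases List.eq_nil_or_concat y with rfl | ⟨ys, c, rfl⟩
  · simp at hy
  · simp only [List.concat_eq_append] at *
    have hget : PySem.List.pyGetD (ys ++ [c]) (-1) 'a' = c := by
      simp [PySem.List.pyGetD, PySem.List.pyGet?, PySem.List.pyIdx?]
    rw [hget, pvTrimR, List.getLast?_concat]
    by_cases hc : c = '.'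
    · rw [if_pos hc, if_pos (by simp [hc])]
    · rw [if_neg hc, if_neg (by simp [hc])]

-- pvTrimR keeps a nonempty list with non-dot head nonempty
lemma pvTrimR_ne_nil (y : List Char) (hy : y ≠ []) (hh : y.head? ≠ some '.') :
    pvTrimR y ≠ [] := by
  rcases List.eq_nil_or_concat y with rfl | ⟨ys, c, rfl⟩
  · simp at hy
  · simp only [List.concat_eq_append] at *
    rw [pvTrimR, List.getLast?_concat]
    split_ifs with h
    · rw [List.dropLast_concat]
      intro hcon
      subst hcon
      simp only [List.nil_append, List.head?_cons] at hh
      exact hh h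
    · exact hy

-- the shared tail: slice to 15, drop trailing dot(s), pad to length 3
lemma pvTail_eq (x : List Char) (hx : x ≠ []) (hh : x.head? ≠ some '.') (hnodd : pvNoDD x) :
    (pvPad3 (if PySem.List.pyGetD (PySem.List.slice x none (some 15)) (-1) 'a' = '.'
        then (PySem.List.slice x none (some 15)).dropLast else PySem.List.slice x none (some 15)))
    = (((PySem.List.slice x none (some 15)).reverse.dropWhile (· == '.')).reverse
        ++ List.replicate (3 - ((PySem.List.slice x none (some 15)).reverse.dropWhile (· == '.')).reverse.length)
            (((PySem.List.slice x none (some 15)).reverse.dropWhile (· == '.')).reverse.getLastD 'a')) := by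
  rw [PySem.List.slice_to _ (by norm_num)]
  set y := x.take (15 : Int).toNat with hy
  have hyne : y ≠ [] := by
    rw [hy]
    cases x with
    | nil => simp at hx
    | cons a t => simp
  have hyh : y.head? ≠ some '.' := by
    rw [hy]
    cases x with
    | nil => simp at hx
    | cons a t =>
      simp only [List.head?_cons] at hh
      simp [hh]
  have hynodd : pvNoDD y := List.IsChain.take hnodd _
  rw [pvPop_eq_trimR y hyne, pvRstrip_eq_trimR y hynodd,
    pvPad3_eq _ (pvTrimR_ne_nil y hyne hyh)]

-- ===== VERDICT =====
set_option maxHeartbeats 1000000 in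
theorem solution_spec : Claim_equal_solution := by
  intro new_id _
  unfold Spec_solution solution solution_alt
  simp only []
  congr 1
  -- name the common filtered list
  set l := (PySem.Chars.lower new_id.toList).filter
    (fun c => PySem.Chars.isalnum c || ['-', '_', '.'].contains c) with hl
  -- A's step-2 loop is a filter
  rw [show ∀ (li : List Char), li.foldl
      (fun acc ch => if (PySem.Chars.isalnum ch || ['-', '_', '.'].contains ch) = true
        then acc ++ [ch] else acc) []
      = li.filter (fun c => PySem.Chars.isalnum c || ['-', '_', '.'].contains c) from
    fun li => by
      simpa using PySem.List.foldl_append_if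
        (fun c => PySem.Chars.isalnum c || ['-', '_', '.'].contains c) id li []]
  rw [← hl]
  -- A's step-3 loop is pvCol
  rw [show (l.foldl (fun st ch => (if ch = '.' ∧ st.2 = ['.'] then st.1 else st.1 ++ [ch], [ch]))
      (([] : List Char), ([] : List Char))).1 = pvCol l false from by
    rw [pvCol_foldl l [] []]; simp]
  -- A's step 4 = trim both edges; pvMain turns it into pvG
  rw [pvTrimL_col l]
  have hmain := pvMain (l.dropWhile (· = '.')).length (l.dropWhile (· = '.')) le_rfl
    (by have h0 := List.head?_dropWhile_not (p := fun c : Char => c = '.') l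
        intro h; rw [h] at h0; simp at h0)
  rw [show (if (pvCol (l.dropWhile (· = '.')) false).getLast? = some '.'
        then (pvCol (l.dropWhile (· = '.')) false).dropLast
        else pvCol (l.dropWhile (· = '.')) false) = pvTrimR (pvCol (l.dropWhile (· = '.')) false)
      from rfl, hmain]
  -- B's split/join is pvG of the same list
  rw [pvSplitOn_eq l, show PySem.Chars.join ['.'] ((pvSplitD [] l).filter (· ≠ [])) = pvG l from rfl,
    pvG_dropDots l]
  -- shared tail on x := (… or 'a')
  set m := pvG (l.dropWhile (· = '.')) with hm
  have hgood := pvGood_G (l.dropWhile (· = '.'))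
  rw [← hm] at hgood
  by_cases hme : m = []
  · rw [if_pos hme]
    exact pvTail_eq ['a'] (by simp) (by simp) (by simp [pvNoDD])
  · rw [if_neg hme]
    exact pvTail_eq m hme hgood.1 hgood.2.2
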